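-- pv_equiv track=rewrite | github.com/lian2945/lian2945-BOJ | 백준/Bronze/13580. Andando no tempo/Andando no tempo.py | can_return_to_present
-- ===== SOURCE A (Python) =====
-- from itertools import combinations, product
--
-- def can_return_to_present(a, b, c):
--     credits = [a, b, c]
--     for r in [1, 2, 3]:
--         for subset in combinations(credits, r):
--             for signs in product([-1, 1], repeat=r):
--                 total = sum(x * s for x, s in zip(subset, signs))
--                 if total == 0:
--                     return "S"
--     return "N"
-- ===== SOURCE B (Python) =====
-- def can_return_to_present(a, b, c):
--     A, B, C = abs(a), abs(b), abs(c)
--     if (A == 0 or B == 0 or C == 0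
--             or A == B or A == C or B == C
--             or A == B + C or B == A + C or C == A + B):
--         return "S"
--     return "N"
-- ===== Notes on version B (the rewrite author's own statement) =====
-- stated objective: simpler
-- what changed: Replaces the triple loop over itertools combinations and sign products with a closed-form flat chain of nine absolute-value comparisons.
import Mathlib
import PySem

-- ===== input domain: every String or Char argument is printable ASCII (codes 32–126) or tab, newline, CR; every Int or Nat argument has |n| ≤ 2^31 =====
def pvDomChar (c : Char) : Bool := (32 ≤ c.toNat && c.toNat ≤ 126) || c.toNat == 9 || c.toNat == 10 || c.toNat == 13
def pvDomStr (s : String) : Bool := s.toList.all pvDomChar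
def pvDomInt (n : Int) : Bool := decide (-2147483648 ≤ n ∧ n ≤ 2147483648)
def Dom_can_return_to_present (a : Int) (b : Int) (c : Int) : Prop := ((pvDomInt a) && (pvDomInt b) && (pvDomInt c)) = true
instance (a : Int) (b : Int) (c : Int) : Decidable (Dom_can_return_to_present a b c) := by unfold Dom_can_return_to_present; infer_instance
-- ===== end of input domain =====

-- B replaces A's triple loop over subset/sign enumerations by a flat chain of nine
-- absolute-value comparisons (objective: simpler).

-- ===== PORT A =====
-- itertools.combinations over a list, in Python's order
def pyCombinations (xs : List Int) : Nat → List (List Int)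
  | 0 => [[]]
  | r + 1 =>
    match xs with
    | [] => []
    | x :: rest => (pyCombinations rest r).map (x :: ·) ++ pyCombinations rest (r + 1)

-- itertools.product([-1, 1], repeat=r), leftmost factor varying slowest
def pySignProduct : Nat → List (List Int)
  | 0 => [[]]
  | r + 1 => ([-1, 1] : List Int).flatMap (fun s => (pySignProduct r).map (s :: ·))

def can_return_to_present (a : Int) (b : Int) (c : Int) : String :=
  let credits : List Int := [a, b, c]
  -- the early 'return "S"' inside the triple loop is rendered as .any over the same iteration
  if ([1, 2, 3] : List Nat).any (fun r =>
      (pyCombinations credits r).any (fun subset =>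
        (pySignProduct r).any (fun signs =>
          (List.zipWith (· * ·) subset signs).sum == 0)))
  then "S" else "N"

-- ===== PORT B =====
def can_return_to_present_alt (a : Int) (b : Int) (c : Int) : String :=
  let A : Int := if a < 0 then -a else a   -- abs(a)
  let B : Int := if b < 0 then -b else b   -- abs(b)
  let C : Int := if c < 0 then -c else c   -- abs(c)
  if A == 0 || B == 0 || C == 0
      || A == B || A == C || B == C
      || A == B + C || B == A + C || C == A + B
  then "S" else "N"

-- ===== PRECONDITION & SPEC =====
def Spec_can_return_to_present (a : Int) (b : Int) (c : Int) (out : String) : Prop := out = can_return_to_present_alt a b c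
instance (a : Int) (b : Int) (c : Int) (out : String) : Decidable (Spec_can_return_to_present a b c out) := by unfold Spec_can_return_to_present; infer_instance

-- ===== CLAIM (what is proved, stated in full; the proofs are below) =====
def Claim_equal_can_return_to_present : Prop := ∀ (a : Int) (b : Int) (c : Int), Dom_can_return_to_present a b c → Spec_can_return_to_present a b c (can_return_to_present a b c)

-- ===== LEMMAS AND PROOFS =====
theorem can_return_to_present_eq (a b c : Int) :
    can_return_to_present a b c = can_return_to_present_alt a b c := by
  unfold can_return_to_present can_return_to_present_alt
  have hc1 : pyCombinations [a,b,c] 1 = [[a],[b],[c]] := rfl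
  have hc2 : pyCombinations [a,b,c] 2 = [[a,b],[a,c],[b,c]] := rfl
  have hc3 : pyCombinations [a,b,c] 3 = [[a,b,c]] := rfl
  have hs1 : pySignProduct 1 = [[-1],[1]] := rfl
  have hs2 : pySignProduct 2 = [[-1,-1],[-1,1],[1,-1],[1,1]] := rfl
  have hs3 : pySignProduct 3 =
      [[-1,-1,-1],[-1,-1,1],[-1,1,-1],[-1,1,1],[1,-1,-1],[1,-1,1],[1,1,-1],[1,1,1]] := rfl
  simp only [List.any_cons, List.any_nil, hc1, hc2, hc3, hs1, hs2, hs3,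
    List.zipWith, List.sum_cons, List.sum_nil, Bool.or_false]
  simp only [Bool.or_eq_true, beq_iff_eq]
  split_ifs <;> first | rfl | omega

-- ===== VERDICT (by name: the statement is the Claim_ definition above) =====
theorem can_return_to_present_spec : Claim_equal_can_return_to_present := by
  intro a b c _
  unfold Spec_can_return_to_present
  exact can_return_to_present_eq a b c
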